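-- pv_equiv track=rewrite | github.com/StudyAlgorithmTeam/Season3 | 7주차/김동주/extra/boj_25178.py | is_duramuri
-- ===== SOURCE A (Python) =====
-- from collections import Counter
--
-- def is_aeiou(c: str):
--     return c in 'aeiou'
--
-- def is_duramuri(w1: str, w2: str) -> bool:
--     """
--     >>> is_duramuri('durumari', 'duramuri')
--     True
--     >>> is_duramuri('durumari', 'darmurui')
--     True
--     >>> is_duramuri('durumari', 'dumurari')
--     False
--     >>> is_duramuri('durumari', 'darumari')
--     False
--     >>> is_duramuri('durumari', 'abcdefgh')
--     False
--     """
--     # 1. 한 단어를 재배열해 다른 단어를 만들 수 있어야 한다.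
--     # O(N)
--     if Counter(w1) != Counter(w2):
--         return False
--     # 2. 두 단어의 첫 글자와 마지막 글자는 서로 동일해야 한다.
--     # O(1)
--     if w1[0] != w2[0] or w1[-1] != w2[-1]:
--         return False
--     # 3. 각 단어에서 모음(a, e, i, o, u)을 제거한 문자열은 동일해야 한다.
--     # O(N)
--     i1 = 0
--     i2 = 0
--     while i1 < len(w1) and i2 < len(w2):
--         while i1 < len(w1) and is_aeiou(w1[i1]):
--             i1 += 1
--         while i2 < len(w2) and is_aeiou(w2[i2]):
--             i2 += 1
--         if i1 < len(w1) and i2 < len(w2) and w1[i1] != w2[i2]: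
--             return False
--         i1 += 1
--         i2 += 1
--     return True
-- ===== SOURCE B (Python) =====
-- VOWELS = set('aeiou')
--
-- def is_duramuri(w1: str, w2: str) -> bool:
--     if sorted(w1) != sorted(w2):
--         return False
--     if w1[0] != w2[0] or w1[-1] != w2[-1]:
--         return False
--     return [c for c in w1 if c not in VOWELS] == [c for c in w2 if c not in VOWELS]
-- ===== Notes on version B (the rewrite author's own statement) =====
-- stated objective: simpler
-- what changed: Counter multiset test replaced by a sorted-lists comparison, and the interleaved two-pointer vowel-skipping while-loop replaced by materializing both vowel-stripped sequences with one filter pass each and comparing them.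
import Mathlib
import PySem

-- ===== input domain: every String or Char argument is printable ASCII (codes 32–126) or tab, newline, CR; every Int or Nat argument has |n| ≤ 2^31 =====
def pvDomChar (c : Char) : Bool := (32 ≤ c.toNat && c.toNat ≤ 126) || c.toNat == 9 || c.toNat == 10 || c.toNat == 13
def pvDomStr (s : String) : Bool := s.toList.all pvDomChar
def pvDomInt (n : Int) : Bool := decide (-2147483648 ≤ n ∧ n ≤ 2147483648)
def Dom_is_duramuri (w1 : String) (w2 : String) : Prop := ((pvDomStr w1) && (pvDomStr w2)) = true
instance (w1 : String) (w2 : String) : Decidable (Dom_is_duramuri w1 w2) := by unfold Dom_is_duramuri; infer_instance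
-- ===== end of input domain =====

-- B replaces A's Counter comparison by a sorted-lists comparison and A's interleaved two-pointer
-- vowel-skipping while-loop by building the two vowel-stripped sequences (one filter pass each)
-- and comparing them: a simpler decomposition, same return value.

-- ===== PORT A =====
-- c in 'aeiou' — A only ever applies this to a single character, where 'in' is membership
def pvIsAeiou (c : Char) : Bool := ("aeiou".toList).contains c

-- Python's '==' on dicts/Counters: same key set and same value at every key (insertion order ignored)
def pvDictEq (d1 d2 : PySem.Dict Char Int) : Bool :=
  d1.size == d2.size && d1.items.all (fun kv => d2.get? kv.1 == some kv.2)

-- A's while-loop over indices i1/i2, stated on the suffixes w1[i1:], w2[i2:]; the two inner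
-- whiles are dropWhile, the guarded inequality check is the if, then both indices advance (tail).
def pvLoopA : List Char → List Char → Bool
  | [], _ => true
  | _ :: _, [] => true
  | x1 :: r1, x2 :: r2 =>
    let d1 := (x1 :: r1).dropWhile pvIsAeiou
    let d2 := (x2 :: r2).dropWhile pvIsAeiou
    if d1 ≠ [] ∧ d2 ≠ [] ∧ d1.head? ≠ d2.head? then false
    else pvLoopA d1.tail d2.tail
  termination_by l1 l2 => l1.length + l2.length
  decreasing_by
  · have ha := List.length_dropWhile_le pvIsAeiou (x1 :: r1)
    have hb := List.length_dropWhile_le pvIsAeiou (x2 :: r2)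
    simp only [List.length_tail, List.length_cons] at ha hb ⊢
    omega

def is_duramuri (w1 : String) (w2 : String) : Bool :=
  let l1 := w1.toList
  let l2 := w2.toList
  if !(pvDictEq (PySem.Dict.counter l1) (PySem.Dict.counter l2)) then false
  else if PySem.List.pyGetD l1 0 ' ' ≠ PySem.List.pyGetD l2 0 ' '
       ∨ PySem.List.pyGetD l1 (-1) ' ' ≠ PySem.List.pyGetD l2 (-1) ' ' then false
  else pvLoopA l1 l2

-- ===== PORT B =====
def pvVowels : PySem.Set Char := PySem.Set.ofList "aeiou".toList

def is_duramuri_alt (w1 : String) (w2 : String) : Bool :=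
  let l1 := w1.toList
  let l2 := w2.toList
  if PySem.List.sorted l1 (fun x => x) false ≠ PySem.List.sorted l2 (fun x => x) false then false
  else if PySem.List.pyGetD l1 0 ' ' ≠ PySem.List.pyGetD l2 0 ' '
       ∨ PySem.List.pyGetD l1 (-1) ' ' ≠ PySem.List.pyGetD l2 (-1) ' ' then false
  else l1.filter (fun c => !(PySem.Set.contains pvVowels c))
       == l2.filter (fun c => !(PySem.Set.contains pvVowels c))

-- ===== PRECONDITION & SPEC =====
-- Pre_ excludes only (w1 = "", w2 = ""), where A (and B alike) raise IndexError on w1[0].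
def Pre_is_duramuri (w1 : String) (w2 : String) : Prop := ¬(w1 = "" ∧ w2 = "")
instance (w1 : String) (w2 : String) : Decidable (Pre_is_duramuri w1 w2) := by
  unfold Pre_is_duramuri; infer_instance

def pvWitness_is_duramuri : String × String := ("durumari", "duramuri")

def Spec_is_duramuri (w1 : String) (w2 : String) (out : Bool) : Prop := out = is_duramuri_alt w1 w2
instance (w1 : String) (w2 : String) (out : Bool) : Decidable (Spec_is_duramuri w1 w2 out) := by
  unfold Spec_is_duramuri; infer_instance

-- ===== CLAIM (what is proved, stated in full; the proofs are below) =====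
def Claim_equal_is_duramuri : Prop := ∀ (w1 : String) (w2 : String), Dom_is_duramuri w1 w2 → Pre_is_duramuri w1 w2 → Spec_is_duramuri w1 w2 (is_duramuri w1 w2)

-- ===== LEMMAS AND PROOFS =====

-- B's vowel test is A's vowel test
theorem pv_vowels_eq (c : Char) : PySem.Set.contains pvVowels c = pvIsAeiou c := by rfl

-- dropping leading vowels does not change the vowel-stripped sequence
theorem pv_filter_dropWhile (l : List Char) :
    (l.dropWhile pvIsAeiou).filter (fun c => !pvIsAeiou c) = l.filter (fun c => !pvIsAeiou c) := by
  induction l with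
  | nil => rfl
  | cons x t ih =>
    by_cases hx : pvIsAeiou x = true
    · simpa [hx] using ih
    · simp [hx]

theorem pv_head_dropWhile (l : List Char) (a : Char) (t : List Char)
    (h : l.dropWhile pvIsAeiou = a :: t) : pvIsAeiou a = false := by
  have := List.head_dropWhile_not pvIsAeiou (l := l) (by simp [h])
  simpa [h] using this

theorem pv_filter_of_drop (l : List Char) (a : Char) (t : List Char)
    (h : l.dropWhile pvIsAeiou = a :: t) :
    l.filter (fun c => !pvIsAeiou c) = a :: t.filter (fun c => !pvIsAeiou c) := by
  rw [← pv_filter_dropWhile, h, List.filter_cons, pv_head_dropWhile _ _ _ h]; simp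

-- A's two-pointer loop computes "the vowel-stripped sequences are equal",
-- provided those sequences have equal length
theorem pv_loop_eq (l1 l2 : List Char)
    (h : (l1.filter (fun c => !pvIsAeiou c)).length = (l2.filter (fun c => !pvIsAeiou c)).length) :
    pvLoopA l1 l2 = (l1.filter (fun c => !pvIsAeiou c) == l2.filter (fun c => !pvIsAeiou c)) := by
  induction l1, l2 using pvLoopA.induct with
  | case1 l2 =>
    have h2 : l2.filter (fun c => !pvIsAeiou c) = [] :=
      List.eq_nil_of_length_eq_zero (by simpa using h.symm)
    simp [pvLoopA, h2]
  | case2 x1 r1 =>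
    have h1 : (x1 :: r1).filter (fun c => !pvIsAeiou c) = [] :=
      List.eq_nil_of_length_eq_zero (by simpa using h)
    simp [pvLoopA, h1]
  | case3 x1 r1 x2 r2 d1x d2x hcond =>
    rw [show d1x = (x1 :: r1).dropWhile pvIsAeiou from rfl,
        show d2x = (x2 :: r2).dropWhile pvIsAeiou from rfl] at hcond
    obtain ⟨hn1, hn2, hne⟩ := hcond
    obtain ⟨a, t1, hd1⟩ := List.exists_cons_of_ne_nil hn1
    obtain ⟨b, t2, hd2⟩ := List.exists_cons_of_ne_nil hn2
    rw [hd1, hd2] at hne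
    simp only [List.head?_cons, ne_eq, Option.some.injEq] at hne
    rw [pvLoopA]
    rw [if_pos ⟨hn1, hn2, by rw [hd1, hd2]; simpa using hne⟩]
    rw [pv_filter_of_drop _ _ _ hd1, pv_filter_of_drop _ _ _ hd2]
    simp [hne]
  | case4 x1 r1 x2 r2 d1x d2x hcond ih =>
    rw [show d1x = (x1 :: r1).dropWhile pvIsAeiou from rfl,
        show d2x = (x2 :: r2).dropWhile pvIsAeiou from rfl] at hcond ih
    rw [pvLoopA]
    rw [if_neg hcond]
    cases hd1 : (x1 :: r1).dropWhile pvIsAeiou with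
    | nil =>
      have hf1 : (x1 :: r1).filter (fun c => !pvIsAeiou c) = [] := by
        rw [← pv_filter_dropWhile, hd1]; rfl
      have hf2 : (x2 :: r2).filter (fun c => !pvIsAeiou c) = [] :=
        List.eq_nil_of_length_eq_zero (by rw [← h, hf1]; rfl)
      rw [hd1] at ih
      cases hd2 : (x2 :: r2).dropWhile pvIsAeiou with
      | nil => simp [pvLoopA, hf1, hf2]
      | cons b t2 =>
        exfalso
        rw [pv_filter_of_drop _ _ _ hd2] at hf2
        exact List.cons_ne_nil _ _ hf2
    | cons a t1 =>
      have hf1 := pv_filter_of_drop _ _ _ hd1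
      cases hd2 : (x2 :: r2).dropWhile pvIsAeiou with
      | nil =>
        exfalso
        have hf2 : (x2 :: r2).filter (fun c => !pvIsAeiou c) = [] := by
          rw [← pv_filter_dropWhile, hd2]; rfl
        rw [hf1, hf2] at h; simp at h
      | cons b t2 =>
        have hf2 := pv_filter_of_drop _ _ _ hd2
        have hab : a = b := by
          rw [hd1, hd2] at hcond
          by_contra hne
          exact hcond ⟨List.cons_ne_nil _ _, List.cons_ne_nil _ _, by simpa using hne⟩
        subst hab
        rw [hd1, hd2] at ih
        simp only [List.tail_cons] at ih
        have hlen : (t1.filter (fun c => !pvIsAeiou c)).length = (t2.filter (fun c => !pvIsAeiou c)).length := by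
          rw [hf1, hf2] at h; simpa using h
        simp only [List.tail_cons]
        rw [ih hlen, hf1, hf2]
        simp

-- Python's Counter(w1) == Counter(w2) is multiset equality
theorem pv_counterEq_iff_perm (l1 l2 : List Char) :
    pvDictEq (PySem.Dict.counter l1) (PySem.Dict.counter l2) = true ↔ l1.Perm l2 := by
  unfold pvDictEq
  rw [Bool.and_eq_true, beq_iff_eq, List.all_eq_true]
  constructor
  · rintro ⟨hsize, hall⟩
    have hsub : PySem.Set.ofList l1 ⊆ PySem.Set.ofList l2 := by
      intro k hk
      have hmem : (k, (List.count k l1 : Int)) ∈ (PySem.Dict.counter l1).items := by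
        rw [PySem.Dict.items_counter]; exact List.mem_map.mpr ⟨k, hk, rfl⟩
      have := hall _ hmem
      rw [beq_iff_eq] at this
      simp only at this
      have hct : (PySem.Dict.counter l2).contains k = true := by
        rw [PySem.Dict.contains_eq_isSome_get?, this]; rfl
      rw [PySem.Dict.contains_counter] at hct
      exact (PySem.Set.mem_ofList _ _).mpr (List.contains_iff_mem.mp hct)
    have hlen : (PySem.Set.ofList l1).length = (PySem.Set.ofList l2).length := by
      have h1 := PySem.Dict.items_counter l1
      have h2 := PySem.Dict.items_counter l2
      have : (PySem.Dict.counter l1).items.length = (PySem.Dict.counter l2).items.length := by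
        simpa [PySem.Dict.size] using hsize
      rw [h1, h2] at this; simpa using this
    have hsetperm : (PySem.Set.ofList l1).Perm (PySem.Set.ofList l2) :=
      List.Subperm.perm_of_length_le
        (List.subperm_of_subset (PySem.Set.nodup_ofList _) hsub) (le_of_eq hlen.symm)
    refine List.perm_iff_count.mpr fun c => ?_
    by_cases hc : c ∈ l1
    · have hmem : (c, (List.count c l1 : Int)) ∈ (PySem.Dict.counter l1).items := by
        rw [PySem.Dict.items_counter]
        exact List.mem_map.mpr ⟨c, (PySem.Set.mem_ofList _ _).mpr hc, rfl⟩
      have := hall _ hmem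
      rw [beq_iff_eq] at this
      simp only at this
      have hgd : (PySem.Dict.counter l2).getD c 0 = (List.count c l1 : Int) :=
        PySem.Dict.getD_of_get?_eq_some _ 0 this
      rw [PySem.Dict.getD_counter] at hgd
      exact_mod_cast hgd.symm
    · have hc2 : c ∉ l2 := by
        intro h
        exact hc ((PySem.Set.mem_ofList _ _).mp
          (hsetperm.mem_iff.mpr ((PySem.Set.mem_ofList _ _).mpr h)))
      rw [List.count_eq_zero_of_not_mem hc, List.count_eq_zero_of_not_mem hc2]
  · intro hp
    have hmemiff : ∀ a, a ∈ PySem.Set.ofList l1 ↔ a ∈ PySem.Set.ofList l2 := by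
      intro a
      rw [PySem.Set.mem_ofList, PySem.Set.mem_ofList]; exact hp.mem_iff
    have hsetperm : (PySem.Set.ofList l1).Perm (PySem.Set.ofList l2) :=
      (List.perm_ext_iff_of_nodup (PySem.Set.nodup_ofList _) (PySem.Set.nodup_ofList _)).mpr hmemiff
    constructor
    · simp [PySem.Dict.size, PySem.Dict.items_counter, hsetperm.length_eq]
    · intro kv hkv
      rw [PySem.Dict.items_counter] at hkv
      obtain ⟨k, hk, rfl⟩ := List.mem_map.mp hkv
      have hk2 : k ∈ l2 := hp.mem_iff.mp ((PySem.Set.mem_ofList _ _).mp hk)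
      have hct : (PySem.Dict.counter l2).contains k = true := by
        rw [PySem.Dict.contains_counter]; exact List.contains_iff_mem.mpr hk2
      rw [PySem.Dict.contains_eq_isSome_get?] at hct
      obtain ⟨v, hv⟩ := Option.isSome_iff_exists.mp hct
      have : v = (List.count k l2 : Int) := by
        have := PySem.Dict.getD_of_get?_eq_some _ 0 hv
        rw [PySem.Dict.getD_counter] at this; omega
      simp only [hv, this, hp.count_eq k]
      simp

-- ===== VERDICT (by name: the statement is the Claim_ definition above) =====
theorem is_duramuri_spec : Claim_equal_is_duramuri := by
  intro w1 w2 _ _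
  unfold Spec_is_duramuri is_duramuri is_duramuri_alt
  set l1 := w1.toList
  set l2 := w2.toList
  by_cases hp : l1.Perm l2
  · have hc : pvDictEq (PySem.Dict.counter l1) (PySem.Dict.counter l2) = true :=
      (pv_counterEq_iff_perm l1 l2).mpr hp
    have hs : PySem.List.sorted l1 (fun x => x) false = PySem.List.sorted l2 (fun x => x) false :=
      (PySem.List.sorted_id_eq_sorted_id_iff_perm l1 l2).mpr hp
    simp only [hc, hs, Bool.not_true, Bool.false_eq_true, if_false, ne_eq, not_true_eq_false]
    by_cases hg : PySem.List.pyGetD l1 0 ' ' ≠ PySem.List.pyGetD l2 0 ' '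
       ∨ PySem.List.pyGetD l1 (-1) ' ' ≠ PySem.List.pyGetD l2 (-1) ' '
    · rw [if_pos hg, if_pos (by simpa using hg)]
    · rw [if_neg hg, if_neg (by simpa using hg)]
      have hv : (fun c => !(PySem.Set.contains pvVowels c)) = (fun c => !pvIsAeiou c) :=
        funext fun c => by rw [pv_vowels_eq]
      rw [hv]
      exact pv_loop_eq l1 l2 ((hp.filter _).length_eq)
  · have hc : pvDictEq (PySem.Dict.counter l1) (PySem.Dict.counter l2) = false := by
      cases hcc : pvDictEq (PySem.Dict.counter l1) (PySem.Dict.counter l2)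
      · rfl
      · exact absurd ((pv_counterEq_iff_perm l1 l2).mp hcc) hp
    have hs : PySem.List.sorted l1 (fun x => x) false ≠ PySem.List.sorted l2 (fun x => x) false := by
      intro h; exact hp ((PySem.List.sorted_id_eq_sorted_id_iff_perm l1 l2).mp h)
    simp only [hc, Bool.not_false, ne_eq, hs, not_false_eq_true, if_true]
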